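-- pv_equiv track=rewrite | github.com/Wang-Yann/LeetCodeMe | python/LCP/LCP 17_nGK0Fy.py | calculate
-- ===== SOURCE A (Python) =====
-- def calculate(s: str) -> int:
--     x, y = 1, 0
--     for char in s:
--         if char == "A":
--             x = 2 * x + y
--         elif char == "B":
--             y = 2 * y + x
--     return x + y
-- ===== SOURCE B (Python) =====
-- def calculate(s: str) -> int:
--     # Each 'A'/'B' operation doubles x+y (starting from 1), others leave it
--     # unchanged, so the result is the closed form 2 ** (#A + #B).
--     return 2 ** sum(c in "AB" for c in s)
-- ===== Notes on version B (the rewrite author's own statement) =====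
-- stated objective: simpler
-- what changed: Replaced the step-by-step (x,y) state simulation with the closed form 2^(#A + #B), since each 'A'/'B' operation doubles x+y.
import Mathlib
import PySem

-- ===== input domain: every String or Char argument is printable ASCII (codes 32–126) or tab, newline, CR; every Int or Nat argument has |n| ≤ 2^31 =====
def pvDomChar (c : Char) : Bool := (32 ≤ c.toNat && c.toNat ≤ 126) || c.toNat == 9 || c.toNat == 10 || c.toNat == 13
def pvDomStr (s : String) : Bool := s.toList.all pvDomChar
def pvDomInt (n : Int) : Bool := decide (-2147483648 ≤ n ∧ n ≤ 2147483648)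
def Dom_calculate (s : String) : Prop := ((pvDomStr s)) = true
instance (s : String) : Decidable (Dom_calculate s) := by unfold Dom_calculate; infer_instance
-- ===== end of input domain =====

-- B replaces A's step-by-step (x,y) simulation by the closed form 2^(#A + #B): simpler.

-- ===== PORT A =====
def calcStep (st : Int × Int) (c : Char) : Int × Int :=
  if c == 'A' then (2 * st.1 + st.2, st.2)
  else if c == 'B' then (st.1, 2 * st.2 + st.1)
  else st

def calculate (s : String) : Int :=
  let st := s.toList.foldl calcStep (1, 0)
  st.1 + st.2

-- ===== PORT B =====
def calculate_alt (s : String) : Int :=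
  (2 : Int) ^ (s.toList.countP (fun c => c == 'A' || c == 'B'))

-- ===== PRECONDITION & SPEC =====
def Spec_calculate (s : String) (out : Int) : Prop := out = calculate_alt s
instance (s : String) (out : Int) : Decidable (Spec_calculate s out) := by unfold Spec_calculate; infer_instance

-- ===== CLAIM (what is proved, stated in full; the proofs are below) =====
def Claim_equal_calculate : Prop := ∀ (s : String), Dom_calculate s → Spec_calculate s (calculate s)

-- ===== LEMMAS AND PROOFS =====

-- loop invariant: the fold multiplies x+y by 2 for each 'A'/'B' character
theorem calcStep_sum (l : List Char) (x y : Int) :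
    (l.foldl calcStep (x, y)).1 + (l.foldl calcStep (x, y)).2
      = (x + y) * 2 ^ (l.countP (fun c => c == 'A' || c == 'B')) := by
  induction l generalizing x y with
  | nil => simp
  | cons c t ih =>
    by_cases hA : c = 'A'
    · simp [calcStep, hA, ih, pow_succ]; ring
    · by_cases hB : c = 'B'
      · simp [calcStep, hB, ih, pow_succ]; ring
      · simp [calcStep, hA, hB, ih]

-- ===== VERDICT (by name: the statement is the Claim_ definition above) =====
theorem calculate_spec : Claim_equal_calculate := by
  intro s _
  unfold Spec_calculate calculate calculate_alt
  simpa using calcStep_sum s.toList 1 0
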